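-- pv_equiv track=rewrite | github.com/denismath98/sdlc-agent | services/file_service.py | parse_files_from_llm
-- ===== SOURCE A (Python) =====
-- from typing import Dict
--
-- def parse_files_from_llm(text: str) -> Dict[str, str]:
--     files: Dict[str, str] = {}
--     current_path = None
--     buffer = []
--
--     for line in text.splitlines():
--         if line.startswith("FILE: "):
--             if current_path:
--                 files[current_path] = "\n".join(buffer).rstrip() + "\n"
--             current_path = line.replace("FILE: ", "").strip()
--             buffer = []
--         else:
--             buffer.append(line)
--
--     if current_path:
--         files[current_path] = "\n".join(buffer).rstrip() + "\n"
--
--     return files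
-- ===== SOURCE B (Python) =====
-- def parse_files_from_llm(text):
--     # traverse the lines back-to-front: body lines accumulate until their
--     # header is reached, which emits one (path, content) item; then build
--     # the dict from the items in forward order.
--     items = []
--     body = []
--     for line in reversed(text.splitlines()):
--         if line.startswith("FILE: "):
--             path = line.replace("FILE: ", "").strip()
--             if path:
--                 items.append((path, "\n".join(reversed(body)).rstrip() + "\n"))
--             body = []
--         else:
--             body.append(line)
--     files = {}
--     for path, content in reversed(items):
--         files[path] = content
--     return files
-- ===== Notes on version B (the rewrite author's own statement) =====
-- stated objective: alternative
-- what changed: Replaces A's forward stateful loop with pending current_path/buffer and two flush sites by a single reverse traversal that attributes body lines to the header that closes them (emitting (path, content) items back-to-front), followed by a dict build in forward order; no flush duplication and no optional pending state.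
import Mathlib
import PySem

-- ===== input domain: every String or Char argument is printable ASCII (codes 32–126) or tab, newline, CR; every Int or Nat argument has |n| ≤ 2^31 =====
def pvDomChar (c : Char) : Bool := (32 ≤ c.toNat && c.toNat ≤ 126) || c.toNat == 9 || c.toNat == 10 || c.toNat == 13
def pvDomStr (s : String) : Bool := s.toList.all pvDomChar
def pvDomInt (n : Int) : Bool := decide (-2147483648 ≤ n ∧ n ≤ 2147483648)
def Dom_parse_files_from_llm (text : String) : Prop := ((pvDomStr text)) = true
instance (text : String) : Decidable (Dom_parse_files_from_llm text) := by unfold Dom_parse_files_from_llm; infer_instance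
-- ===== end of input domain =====

-- B replaces A's forward loop with pending-path/buffer state and two flush sites by a
-- reverse traversal emitting (path, content) items back-to-front, then a forward dict build.

-- ===== PORT A =====
-- loop body of A's 'for line in text.splitlines()'
def pvStepA (st : PySem.Dict String String × Option String × List String) (line : String) :
    PySem.Dict String String × Option String × List String :=
  if PySem.Str.startswith line "FILE: " then
    let files :=
      match st.2.1 with     -- 'if current_path:' (falsy for None and "")
      | some p => if p ≠ "" then st.1.insert p (PySem.Str.rstrip (PySem.Str.join "\n" st.2.2) ++ "\n") else st.1
      | none => st.1
    (files, some (PySem.Str.strip (PySem.Str.replace line "FILE: " "")), [])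
  else
    (st.1, st.2.1, st.2.2 ++ [line])

def parse_files_from_llm (text : String) : List (String × String) :=
  let st := (PySem.Str.splitlines text).foldl pvStepA (PySem.Dict.empty, none, [])
  let files :=
    match st.2.1 with       -- final 'if current_path:' flush
    | some p => if p ≠ "" then st.1.insert p (PySem.Str.rstrip (PySem.Str.join "\n" st.2.2) ++ "\n") else st.1
    | none => st.1
  files.items

-- ===== PORT B =====
-- loop body of B's 'for line in reversed(text.splitlines())'
def pvStepB (st : List (String × String) × List String) (line : String) :
    List (String × String) × List String :=
  if PySem.Str.startswith line "FILE: " then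
    let path := PySem.Str.strip (PySem.Str.replace line "FILE: " "")
    (if path ≠ "" then st.1 ++ [(path, PySem.Str.rstrip (PySem.Str.join "\n" st.2.reverse) ++ "\n")] else st.1, [])
  else
    (st.1, st.2 ++ [line])

def parse_files_from_llm_alt (text : String) : List (String × String) :=
  let st := ((PySem.Str.splitlines text).reverse).foldl pvStepB ([], [])
  (st.1.reverse.foldl (fun (d : PySem.Dict String String) pc => d.insert pc.1 pc.2) PySem.Dict.empty).items

-- ===== PRECONDITION & SPEC =====
def Spec_parse_files_from_llm (text : String) (out : List (String × String)) : Prop := out = parse_files_from_llm_alt text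
instance (text : String) (out : List (String × String)) : Decidable (Spec_parse_files_from_llm text out) := by unfold Spec_parse_files_from_llm; infer_instance

-- ===== CLAIM (what is proved, stated in full; the proofs are below) =====
def Claim_equal_parse_files_from_llm : Prop := ∀ (text : String), Dom_parse_files_from_llm text → Spec_parse_files_from_llm text (parse_files_from_llm text)

-- ===== LEMMAS AND PROOFS =====

-- common vocabulary for the equivalence proof
def pvHdr (l : String) : Bool := PySem.Str.startswith l "FILE: "
def pvPath (l : String) : String := PySem.Str.strip (PySem.Str.replace l "FILE: " "")
def pvRender (b : List String) : String := PySem.Str.rstrip (PySem.Str.join "\n" b) ++ "\n"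
def pvEmit (p : String) (b : List String) : List (String × String) :=
  if p ≠ "" then [(p, pvRender b)] else []

-- the (path, content) items both programs produce, one per header line, in header order
def pvChunkItems : List String → List (String × String)
  | [] => []
  | l :: ls =>
    if pvHdr l then
      pvEmit (pvPath l) (ls.takeWhile (fun x => !pvHdr x)) ++ pvChunkItems (ls.dropWhile (fun x => !pvHdr x))
    else pvChunkItems ls
termination_by ls => ls.length
decreasing_by
  · exact Nat.lt_succ_of_le (List.Sublist.length_le (List.dropWhile_sublist _))
  · exact Nat.lt_succ_self _

def pvApply (d : PySem.Dict String String) (items : List (String × String)) : PySem.Dict String String :=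
  items.foldl (fun d pc => d.insert pc.1 pc.2) d

def pvFinishA (st : PySem.Dict String String × Option String × List String) : PySem.Dict String String :=
  match st.2.1 with
  | some p => if p ≠ "" then st.1.insert p (pvRender st.2.2) else st.1
  | none => st.1

theorem pvChunkItems_nil : pvChunkItems [] = [] := by rw [pvChunkItems]

theorem pvChunkItems_cons_hdr (l : String) (ls : List String) (h : pvHdr l = true) :
    pvChunkItems (l :: ls) =
      pvEmit (pvPath l) (ls.takeWhile (fun x => !pvHdr x)) ++ pvChunkItems (ls.dropWhile (fun x => !pvHdr x)) := by
  rw [pvChunkItems]; simp [h]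

theorem pvChunkItems_cons_not (l : String) (ls : List String) (h : pvHdr l = false) :
    pvChunkItems (l :: ls) = pvChunkItems ls := by
  rw [pvChunkItems]; simp [h]

theorem pvChunkItems_dropWhile (ls : List String) :
    pvChunkItems (ls.dropWhile (fun x => !pvHdr x)) = pvChunkItems ls := by
  induction ls with
  | nil => rfl
  | cons l ls ih =>
    by_cases h : pvHdr l
    · simp [h]
    · rw [Bool.not_eq_true] at h
      rw [List.dropWhile_cons]
      simp only [h, Bool.not_false, if_true]
      rw [ih, pvChunkItems_cons_not _ _ h]

theorem pvApply_append (d : PySem.Dict String String) (xs ys : List (String × String)) :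
    pvApply d (xs ++ ys) = pvApply (pvApply d xs) ys := by
  simp [pvApply, List.foldl_append]

theorem pvApply_emit (d : PySem.Dict String String) (p : String) (b : List String) :
    pvApply d (pvEmit p b) = (if p ≠ "" then d.insert p (pvRender b) else d) := by
  by_cases hp : p = "" <;> simp [pvEmit, pvApply, hp]

-- A's loop step, restated through the vocabulary
theorem pvStepA_hdr (files : PySem.Dict String String) (p : String) (buf : List String)
    (l : String) (h : pvHdr l = true) :
    pvStepA (files, some p, buf) l =
      ((if p ≠ "" then files.insert p (pvRender buf) else files), some (pvPath l), []) := by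
  have h' : PySem.Str.startswith l "FILE: " = true := h
  simp only [pvStepA, h', if_true, pvRender, pvPath]

theorem pvStepA_hdr0 (files : PySem.Dict String String) (buf : List String)
    (l : String) (h : pvHdr l = true) :
    pvStepA (files, none, buf) l = (files, some (pvPath l), []) := by
  have h' : PySem.Str.startswith l "FILE: " = true := h
  simp only [pvStepA, h', if_true, pvPath]

theorem pvStepA_not (files : PySem.Dict String String) (cp : Option String) (buf : List String)
    (l : String) (h : pvHdr l = false) :
    pvStepA (files, cp, buf) l = (files, cp, buf ++ [l]) := by
  have h' : PySem.Str.startswith l "FILE: " = false := h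
  simp only [pvStepA, h', Bool.false_eq_true, if_false]

-- B's loop step, restated through the vocabulary
theorem pvStepB_hdr (items : List (String × String)) (body : List String)
    (l : String) (h : pvHdr l = true) :
    pvStepB (items, body) l = (items ++ pvEmit (pvPath l) body.reverse, []) := by
  have h' : PySem.Str.startswith l "FILE: " = true := h
  simp only [pvStepB, h', if_true, pvPath, pvEmit, pvRender]
  split <;> simp

theorem pvStepB_not (items : List (String × String)) (body : List String)
    (l : String) (h : pvHdr l = false) :
    pvStepB (items, body) l = (items, body ++ [l]) := by
  have h' : PySem.Str.startswith l "FILE: " = false := h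
  simp only [pvStepB, h', Bool.false_eq_true, if_false]

-- A-side: running the loop with an active path p and buffer buf, then final-flushing
theorem pvA_run (ls : List String) : ∀ (buf : List String) (files : PySem.Dict String String) (p : String),
    pvFinishA (ls.foldl pvStepA (files, some p, buf)) =
      pvApply files (pvEmit p (buf ++ ls.takeWhile (fun x => !pvHdr x)) ++ pvChunkItems (ls.dropWhile (fun x => !pvHdr x))) := by
  induction ls with
  | nil =>
    intro buf files p
    simp only [List.foldl_nil, List.dropWhile_nil, List.append_nil,
      pvChunkItems_nil]
    rw [pvApply_emit]
    by_cases h : p = "" <;> simp [pvFinishA, h]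
  | cons l ls ih =>
    intro buf files p
    by_cases h : pvHdr l
    · rw [List.foldl_cons, pvStepA_hdr _ _ _ _ h, ih]
      rw [List.takeWhile_cons, List.dropWhile_cons]
      simp only [h, Bool.not_true, Bool.false_eq_true, if_false]
      rw [pvChunkItems_cons_hdr _ _ h]
      rw [pvApply_append, pvApply_append, pvApply_append, pvApply_emit, pvApply_emit]
      by_cases hp : p = "" <;> by_cases hq : pvPath l = "" <;> simp [pvEmit, pvApply, hp, hq]
    · rw [Bool.not_eq_true] at h
      rw [List.foldl_cons, pvStepA_not _ _ _ _ h, ih]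
      rw [List.takeWhile_cons, List.dropWhile_cons]
      simp only [h, Bool.not_false, if_true, List.append_assoc, List.singleton_append]

-- A-side: running from the initial (no current path) state
theorem pvA_run0 (ls : List String) : ∀ (buf : List String) (files : PySem.Dict String String),
    pvFinishA (ls.foldl pvStepA (files, none, buf)) = pvApply files (pvChunkItems ls) := by
  induction ls with
  | nil => intro buf files; simp [pvFinishA, pvApply, pvChunkItems_nil]
  | cons l ls ih =>
    intro buf files
    by_cases h : pvHdr l
    · rw [List.foldl_cons, pvStepA_hdr0 _ _ _ h, pvA_run, pvChunkItems_cons_hdr _ _ h]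
      simp
    · rw [Bool.not_eq_true] at h
      rw [List.foldl_cons, pvStepA_not _ _ _ _ h, ih, pvChunkItems_cons_not _ _ h]

-- B-side: the reverse fold yields the chunk items reversed, and the reversed preamble as pending body
theorem pvB_run (ls : List String) :
    ls.reverse.foldl pvStepB ([], []) =
      ((pvChunkItems ls).reverse, (ls.takeWhile (fun x => !pvHdr x)).reverse) := by
  rw [List.foldl_reverse]
  induction ls with
  | nil => simp [pvChunkItems_nil]
  | cons l ls ih =>
    rw [List.foldr_cons, ih]
    by_cases h : pvHdr l
    · rw [pvStepB_hdr _ _ _ h, List.reverse_reverse, pvChunkItems_cons_hdr _ _ h,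
        pvChunkItems_dropWhile, List.takeWhile_cons]
      simp only [h, Bool.not_true, Bool.false_eq_true, if_false, List.reverse_append,
        List.reverse_nil, Prod.mk.injEq, and_true]
      by_cases hp : pvPath l = "" <;> simp [pvEmit, hp]
    · rw [Bool.not_eq_true] at h
      rw [pvStepB_not _ _ _ h, pvChunkItems_cons_not _ _ h, List.takeWhile_cons]
      simp [h]

-- ===== VERDICT (by name: the statement is the Claim_ definition above) =====
theorem parse_files_from_llm_spec : Claim_equal_parse_files_from_llm := by
  intro text _
  show parse_files_from_llm text = parse_files_from_llm_alt text
  have hA : parse_files_from_llm text =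
      (pvFinishA ((PySem.Str.splitlines text).foldl pvStepA (PySem.Dict.empty, none, []))).items := rfl
  have hB : parse_files_from_llm_alt text =
      (pvApply PySem.Dict.empty ((((PySem.Str.splitlines text).reverse.foldl pvStepB ([], [])).1).reverse)).items := rfl
  rw [hA, hB, pvA_run0, pvB_run]
  simp
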